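-- pv_equiv track=rewrite | github.com/MartinConde90/katas3_calculadora_r | romannumber.py | __numParentesis
-- ===== SOURCE A (Python) =====
-- def __numParentesis(cadena):
--     num = 0
--     for c in cadena: #cuenta los parentesis en cada grupo
--         if c == '(':
--             num += 1
--         else:
--             break
--     return num
-- ===== SOURCE B (Python) =====
-- def __numParentesis(cadena):
--     # Binary search for the largest k such that the first k characters are all '('.
--     # The predicate cadena[:k] == '(' * k is monotone (true for k, true for all smaller),
--     # so the answer is found by bisection instead of a linear scan.
--     lo, hi = 0, len(cadena)
--     while lo < hi:
--         mid = (lo + hi + 1) // 2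
--         if cadena[:mid] == '(' * mid:
--             lo = mid
--         else:
--             hi = mid - 1
--     return lo
-- ===== Notes on version B (the rewrite author's own statement) =====
-- stated objective: alternative
-- what changed: Replaces the scan-and-break counting loop by a binary search for the largest k with cadena[:k] == '(' * k, exploiting that the all-parenthesis-prefix predicate is monotone in k.
import Mathlib
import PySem

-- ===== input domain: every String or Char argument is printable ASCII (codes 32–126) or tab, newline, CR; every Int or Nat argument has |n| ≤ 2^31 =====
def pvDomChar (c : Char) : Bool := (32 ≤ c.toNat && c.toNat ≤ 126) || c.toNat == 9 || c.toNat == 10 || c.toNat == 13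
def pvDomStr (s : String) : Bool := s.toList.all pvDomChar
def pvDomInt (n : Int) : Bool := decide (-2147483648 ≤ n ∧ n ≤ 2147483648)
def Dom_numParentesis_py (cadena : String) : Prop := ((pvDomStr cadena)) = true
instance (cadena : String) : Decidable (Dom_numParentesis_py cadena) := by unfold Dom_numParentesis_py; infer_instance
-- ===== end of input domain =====

-- B replaces the linear scan-and-break loop by a binary search for the largest k with
-- cadena[:k] == '(' * k (the predicate is monotone in k): alternative algorithm, same result.

-- ===== PORT A =====
-- loop 'for c in cadena: if c == '(': num += 1 else: break' as structural recursion over the chars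
def numParentesisLoop : List Char → Int → Int
  | [], num => num
  | c :: rest, num => if c == '(' then numParentesisLoop rest (num + 1) else num

def numParentesis_py (cadena : String) : Int :=
  numParentesisLoop cadena.toList 0

-- ===== PORT B =====
-- midpoint lemma for the termination of the binary-search loop
theorem pvMidBounds (lo hi : Int) (h : lo < hi) :
    lo + 1 ≤ PySem.Int.floordiv (lo + hi + 1) 2 ∧ PySem.Int.floordiv (lo + hi + 1) 2 ≤ hi := by
  constructor
  · rw [PySem.Int.le_floordiv_iff_mul_le (by omega)]; omega
  · have := (PySem.Int.floordiv_lt_iff_lt_mul (a := lo + hi + 1) (b := 2) (q := hi + 1) (by omega)).mpr (by omega)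
    omega

-- the 'while lo < hi' bisection loop of Source B; inside the loop 1 ≤ mid ≤ len(cadena), so the
-- slice cadena[:mid] is 'take mid' and '(' * mid is 'replicate mid' exactly
def numParentesisBS (chars : List Char) (lo hi : Int) : Int :=
  if h : lo < hi then
    let mid := PySem.Int.floordiv (lo + hi + 1) 2
    if chars.take mid.toNat = List.replicate mid.toNat '(' then
      numParentesisBS chars mid hi
    else
      numParentesisBS chars lo (mid - 1)
  else lo
termination_by (hi - lo).toNat
decreasing_by
  · have := pvMidBounds lo hi h; omega
  · have := pvMidBounds lo hi h; omega

def numParentesis_py_alt (cadena : String) : Int :=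
  numParentesisBS cadena.toList 0 (cadena.toList.length : Int)

-- ===== PRECONDITION & SPEC =====
def Spec_numParentesis_py (cadena : String) (out : Int) : Prop := out = numParentesis_py_alt cadena
instance (cadena : String) (out : Int) : Decidable (Spec_numParentesis_py cadena out) := by unfold Spec_numParentesis_py; infer_instance

-- ===== CLAIM (what is proved, stated in full; the proofs are below) =====
def Claim_equal_numParentesis_py : Prop := ∀ (cadena : String), Dom_numParentesis_py cadena → Spec_numParentesis_py cadena (numParentesis_py cadena)

-- ===== LEMMAS AND PROOFS =====
-- A's loop counts the leading-'(' prefix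
theorem numParentesisLoop_eq (l : List Char) (num : Int) :
    numParentesisLoop l num = num + ((l.takeWhile (fun c => c == '(')).length : Int) := by
  induction l generalizing num with
  | nil => simp [numParentesisLoop]
  | cons c rest ih =>
    by_cases h : c == '('
    · simp [numParentesisLoop, h, ih, List.takeWhile]; ring
    · simp [numParentesisLoop, h, List.takeWhile]

-- the bisection predicate is monotone: the first k chars are all '(' iff k ≤ leading-'(' count
theorem take_eq_replicate_iff (l : List Char) (k : Nat) :
    (l.take k = List.replicate k '(') ↔ k ≤ (l.takeWhile (fun c => c == '(')).length := by
  induction l generalizing k with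
  | nil => cases k <;> simp
  | cons c rest ih =>
    cases k with
    | zero => simp
    | succ k =>
      by_cases h : c = '('
      · simp [h, List.replicate_succ, ih]
      · simp [List.replicate_succ, h]

-- the bisection loop converges to the leading-'(' count n whenever lo ≤ n ≤ hi
theorem numParentesisBS_eq (l : List Char) :
    ∀ fuel (lo hi : Int), (hi - lo).toNat ≤ fuel → 0 ≤ lo →
      lo ≤ ((l.takeWhile (fun c => c == '(')).length : Int) →
      ((l.takeWhile (fun c => c == '(')).length : Int) ≤ hi →
      numParentesisBS l lo hi = ((l.takeWhile (fun c => c == '(')).length : Int) := by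
  intro fuel
  induction fuel with
  | zero =>
    intro lo hi hf h0 h1 h2
    rw [numParentesisBS]
    have : ¬ lo < hi := by omega
    simp [this]; omega
  | succ fuel ih =>
    intro lo hi hf h0 h1 h2
    rw [numParentesisBS]
    by_cases h : lo < hi
    · have hmid := pvMidBounds lo hi h
      set mid := PySem.Int.floordiv (lo + hi + 1) 2 with hmdef
      simp only [h, dite_true]
      by_cases hp : l.take mid.toNat = List.replicate mid.toNat '('
      · rw [if_pos hp]
        have hle : (mid.toNat : Int) ≤ ((l.takeWhile (fun c => c == '(')).length : Int) := by
          exact_mod_cast (take_eq_replicate_iff l mid.toNat).mp hp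
        have hmn : mid ≤ ((l.takeWhile (fun c => c == '(')).length : Int) := by omega
        exact ih mid hi (by omega) (by omega) hmn h2
      · rw [if_neg hp]
        have hgt : ¬ ((mid.toNat : Nat) ≤ (l.takeWhile (fun c => c == '(')).length) := by
          intro hk; exact hp ((take_eq_replicate_iff l mid.toNat).mpr hk)
        have : ((l.takeWhile (fun c => c == '(')).length : Int) < mid := by omega
        exact ih lo (mid - 1) (by omega) h0 h1 (by omega)
    · simp [h]; omega

-- ===== VERDICT (by name: the statement is the Claim_ definition above) =====
theorem numParentesis_py_spec : Claim_equal_numParentesis_py := by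
  intro cadena _
  unfold Spec_numParentesis_py numParentesis_py numParentesis_py_alt
  rw [numParentesisLoop_eq, numParentesisBS_eq cadena.toList ((cadena.toList.length : Int) - 0).toNat 0 (cadena.toList.length : Int) (by omega) (by omega)]
  · ring
  · exact_mod_cast Int.natCast_nonneg _
  · exact_mod_cast (List.takeWhile_sublist _).length_le
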